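-- pv_equiv track=rewrite | github.com/neo4j-partners/chatbot-offshore-leaks | app/english2cypher.py | extract_cypher
-- ===== SOURCE A (Python) =====
-- cypher_prefix = ["ALTER","CALL","CREATE","DEALLOCATE","DELETE","DENY","DETACH","DROP","DRYRUN","ENABLE","FOREACH","GRANT","LOAD","MATCH","MERGE","OPTIONAL","REALLOCATE","REMOVE","RENAME","RETURN","REVOKE","SET","SHOW","START","STOP","TERMINATE","UNWIND","USE","USING","WITH"]
--
-- def extract_cypher(s):
--     if s.startswith(tuple(cypher_prefix)):
--         return s
--     else:
--         arr = s.split('\n', 1)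
--         if len(arr) == 1:
--             return 'MATCH (e:Nothing) return e.name'
--         return extract_cypher(arr[1])
-- ===== SOURCE B (Python) =====
-- cypher_prefix = ["ALTER","CALL","CREATE","DEALLOCATE","DELETE","DENY","DETACH","DROP","DRYRUN","ENABLE","FOREACH","GRANT","LOAD","MATCH","MERGE","OPTIONAL","REALLOCATE","REMOVE","RENAME","RETURN","REVOKE","SET","SHOW","START","STOP","TERMINATE","UNWIND","USE","USING","WITH"]
--
-- def extract_cypher(s):
--     lines = s.split('\n')
--     for i in range(len(lines)):
--         if lines[i].startswith(tuple(cypher_prefix)):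
--             return '\n'.join(lines[i:])
--     return 'MATCH (e:Nothing) return e.name'
-- ===== Notes on version B (the rewrite author's own statement) =====
-- stated objective: simpler
-- what changed: B splits the input into lines once and does a single forward scan for the first line starting with a Cypher keyword, joining from that index, instead of A's recursion that re-splits the remaining suffix at each step.
import Mathlib
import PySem

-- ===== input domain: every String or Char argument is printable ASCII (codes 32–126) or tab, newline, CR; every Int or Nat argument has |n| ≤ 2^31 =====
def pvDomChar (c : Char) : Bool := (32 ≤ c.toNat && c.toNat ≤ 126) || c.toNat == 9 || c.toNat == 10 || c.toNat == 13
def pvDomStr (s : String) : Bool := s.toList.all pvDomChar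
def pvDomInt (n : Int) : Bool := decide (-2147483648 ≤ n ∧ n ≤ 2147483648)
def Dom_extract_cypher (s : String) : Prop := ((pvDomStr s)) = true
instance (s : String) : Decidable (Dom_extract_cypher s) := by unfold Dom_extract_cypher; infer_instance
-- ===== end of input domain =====

-- B replaces A's recursive re-splitting of the suffix by one split('\n') and a single
-- forward scan over the line list (objective: simpler).

-- ===== PORT A =====
def cypher_prefix : List String := ["ALTER","CALL","CREATE","DEALLOCATE","DELETE","DENY","DETACH","DROP","DRYRUN","ENABLE","FOREACH","GRANT","LOAD","MATCH","MERGE","OPTIONAL","REALLOCATE","REMOVE","RENAME","RETURN","REVOKE","SET","SHOW","START","STOP","TERMINATE","UNWIND","USE","USING","WITH"]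

-- characterisation of s.split('\n', 1), needed for the port's termination
theorem go0_eq (fuel : Nat) (l cur : List Char) (acc : List (List Char)) :
    PySem.Chars.splitOnMax.go ['\n'] fuel 0 l cur acc = acc.reverse ++ [cur.reverse ++ l] := by
  cases fuel with
  | zero => simp [PySem.Chars.splitOnMax.go]
  | succ f => cases l <;> simp [PySem.Chars.splitOnMax.go]

theorem go1_eq (cs : List Char) : ∀ (fuel : Nat), cs.length < fuel → ∀ (cur : List Char) (acc : List (List Char)),
    PySem.Chars.splitOnMax.go ['\n'] fuel 1 cs cur acc =
      acc.reverse ++ (if '\n' ∈ cs then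
        [cur.reverse ++ cs.takeWhile (· ≠ '\n'), (cs.dropWhile (· ≠ '\n')).tail]
      else [cur.reverse ++ cs]) := by
  induction cs with
  | nil =>
    intro fuel h cur acc
    cases fuel with
    | zero => omega
    | succ f => simp [PySem.Chars.splitOnMax.go]
  | cons c rest ih =>
    intro fuel h cur acc
    cases fuel with
    | zero => omega
    | succ f =>
      by_cases hc : c = '\n'
      · subst hc
        simp [PySem.Chars.splitOnMax.go, List.isPrefixOf, go0_eq]
      · have : List.isPrefixOf ['\n'] (c :: rest) = false := by
          simp [List.isPrefixOf]; exact fun h => absurd h.symm hc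
        simp only [PySem.Chars.splitOnMax.go, this]
        simp only [Bool.false_eq_true, if_false, if_neg (by omega : ¬ (1 : Nat) = 0)]
        rw [ih f (by simpa using h) (c :: cur) acc]
        simp [hc, List.takeWhile, List.dropWhile, Ne.symm hc]

theorem splitOnMax1_eq (cs : List Char) :
    PySem.Chars.splitOnMax cs ['\n'] 1 =
      (if '\n' ∈ cs then [cs.takeWhile (· ≠ '\n'), (cs.dropWhile (· ≠ '\n')).tail]
       else [cs]) := by
  have := go1_eq cs (cs.length + 1) (by omega) [] []
  simpa [PySem.Chars.splitOnMax] using this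

theorem tail_drop_lt (cs : List Char) (h : '\n' ∈ cs) :
    ((cs.dropWhile (· ≠ '\n')).tail).length < cs.length := by
  have hne : cs.dropWhile (· ≠ '\n') ≠ [] := by
    intro he
    have := List.dropWhile_eq_nil_iff.mp he '\n' h
    simp at this
  have h1 : (cs.dropWhile (· ≠ '\n')).length ≤ cs.length := List.length_dropWhile_le _ _
  have h2 : ((cs.dropWhile (· ≠ '\n')).tail).length < (cs.dropWhile (· ≠ '\n')).length := by
    cases hd : cs.dropWhile (· ≠ '\n') with
    | nil => exact absurd hd hne
    | cons a t => simp
  omega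

def extract_cypher_core (cs : List Char) : List Char :=
  if cypher_prefix.any (fun p => PySem.Chars.startswith cs p.toList) then cs
  else
    let arr := PySem.Chars.splitOnMax cs ['\n'] 1
    if arr.length = 1 then "MATCH (e:Nothing) return e.name".toList
    else extract_cypher_core (arr.getD 1 [])
termination_by cs.length
decreasing_by
  rename_i _arr hlen
  by_cases h : '\n' ∈ cs
  · rw [splitOnMax1_eq, if_pos h]; simpa using tail_drop_lt cs h
  · exact absurd (show ((PySem.Chars.splitOnMax cs ['\n'] 1)).length = 1 by rw [splitOnMax1_eq, if_neg h]; rfl) hlen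

def extract_cypher (s : String) : String := String.ofList (extract_cypher_core s.toList)

-- ===== PORT B =====
def alt_scan (lines : List (List Char)) : List Char :=
  match lines with
  | [] => "MATCH (e:Nothing) return e.name".toList
  | l :: rest =>
    if cypher_prefix.any (fun p => PySem.Chars.startswith l p.toList) then
      PySem.Chars.join ['\n'] (l :: rest)
    else alt_scan rest

def extract_cypher_alt (s : String) : String :=
  String.ofList (alt_scan (PySem.Chars.splitOn s.toList ['\n']))

-- ===== PRECONDITION & SPEC =====
def Spec_extract_cypher (s : String) (out : String) : Prop := out = extract_cypher_alt s
instance (s : String) (out : String) : Decidable (Spec_extract_cypher s out) := by unfold Spec_extract_cypher; infer_instance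

-- ===== CLAIM (what is proved, stated in full; the proofs are below) =====
def Claim_equal_extract_cypher : Prop := ∀ (s : String), Dom_extract_cypher s → Spec_extract_cypher s (extract_cypher s)

-- ===== LEMMAS AND PROOFS =====

-- reference splitter: s.split('\n') as a structural recursion
def splitNl : List Char → List (List Char)
  | [] => [[]]
  | c :: rest =>
    if c = '\n' then [] :: splitNl rest
    else match splitNl rest with
      | [] => [[c]]
      | l :: ls => (c :: l) :: ls

theorem splitNl_ne_nil (cs : List Char) : splitNl cs ≠ [] := by
  cases cs with
  | nil => simp [splitNl]
  | cons c rest => simp only [splitNl]; split <;> [simp; split <;> simp]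

theorem splitNl_step (cs : List Char) :
    splitNl cs = cs.takeWhile (· ≠ '\n') ::
      (if '\n' ∈ cs then splitNl ((cs.dropWhile (· ≠ '\n')).tail) else []) := by
  induction cs with
  | nil => simp [splitNl]
  | cons c rest ih =>
    by_cases hc : c = '\n'
    · subst hc; simp [splitNl, List.takeWhile, List.dropWhile]
    · simp only [splitNl, if_neg hc, ih]
      simp [List.takeWhile, List.dropWhile, hc, Ne.symm hc]

theorem join_splitNl (cs : List Char) : PySem.Chars.join ['\n'] (splitNl cs) = cs := by
  induction cs with
  | nil => simp [splitNl, PySem.Chars.join_singleton]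
  | cons c rest ih =>
    cases hr : splitNl rest with
    | nil => exact absurd hr (splitNl_ne_nil rest)
    | cons l ls =>
      rw [hr] at ih
      by_cases hc : c = '\n'
      · subst hc
        simp only [splitNl, hr, if_true]
        rw [PySem.Chars.join_cons_cons]
        simpa using ih
      · simp only [splitNl, if_neg hc, hr]
        cases ls with
        | nil => simpa [PySem.Chars.join_singleton] using congrArg (c :: ·) ih
        | cons l2 ls2 =>
          rw [PySem.Chars.join_cons_cons] at ih ⊢
          simpa using congrArg (c :: ·) ih

theorem goOn_eq (cs : List Char) : ∀ (fuel : Nat), cs.length < fuel → ∀ (cur : List Char) (acc : List (List Char)),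
    PySem.Chars.splitOn.go ['\n'] fuel cs cur acc =
      acc.reverse ++ (match splitNl cs with
        | [] => [cur.reverse]
        | l :: ls => (cur.reverse ++ l) :: ls) := by
  induction cs with
  | nil =>
    intro fuel h cur acc
    cases fuel with
    | zero => omega
    | succ f => simp [PySem.Chars.splitOn.go, splitNl]
  | cons c rest ih =>
    intro fuel h cur acc
    cases fuel with
    | zero => omega
    | succ f =>
      by_cases hc : c = '\n'
      · subst hc
        simp only [PySem.Chars.splitOn.go, List.isPrefixOf, BEq.rfl, Bool.and_true, if_true,
          List.length_cons, List.length_nil, List.drop_succ_cons, List.drop_zero]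
        rw [ih f (by simpa using h) [] (cur.reverse :: acc)]
        cases hr : splitNl rest with
        | nil => exact absurd hr (splitNl_ne_nil rest)
        | cons l ls => simp [splitNl, hr]
      · have hp : List.isPrefixOf ['\n'] (c :: rest) = false := by
          simp [List.isPrefixOf]; exact fun h => absurd h.symm hc
        simp only [PySem.Chars.splitOn.go, hp, Bool.false_eq_true, if_false]
        rw [ih f (by simpa using h) (c :: cur) acc]
        cases hr : splitNl rest with
        | nil => exact absurd hr (splitNl_ne_nil rest)
        | cons l ls => simp [splitNl, if_neg hc, hr]

theorem splitOn_eq (cs : List Char) : PySem.Chars.splitOn cs ['\n'] = splitNl cs := by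
  have := goOn_eq cs (cs.length + 1) (by omega) [] []
  cases hr : splitNl cs with
  | nil => exact absurd hr (splitNl_ne_nil cs)
  | cons l ls => rw [hr] at this; simpa [PySem.Chars.splitOn] using this

-- a keyword contains no newline, so matching the whole string = matching its first line
theorem prefix_takeWhile (p : List Char) (hnl : '\n' ∉ p) (cs : List Char) :
    List.isPrefixOf p cs = List.isPrefixOf p (cs.takeWhile (· ≠ '\n')) := by
  induction p generalizing cs with
  | nil => simp
  | cons a q ih =>
    have ha : a ≠ '\n' := fun h => hnl (h ▸ List.mem_cons_self)
    cases cs with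
    | nil => simp [List.takeWhile]
    | cons c rest =>
      by_cases hc : c = '\n'
      · subst hc
        simp only [List.takeWhile]
        simp [List.isPrefixOf]
        intro h; exact absurd h ha
      · have hd : (decide (c ≠ '\n')) = true := by simp [hc]
        simp only [List.takeWhile, hd, List.isPrefixOf]
        rw [ih (fun h => hnl (List.mem_cons_of_mem _ h)) rest]

theorem match_takeWhile (cs : List Char) :
    (cypher_prefix.any fun p => PySem.Chars.startswith cs p.toList) =
    (cypher_prefix.any fun p => PySem.Chars.startswith (cs.takeWhile (· ≠ '\n')) p.toList) := by
  refine Bool.eq_iff_iff.mpr ?_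
  simp only [List.any_eq_true]
  constructor
  · rintro ⟨p, hp, hx⟩
    refine ⟨p, hp, ?_⟩
    have hnl : '\n' ∉ p.toList := by fin_cases hp <;> decide
    simp only [PySem.Chars.startswith] at hx ⊢
    rw [← prefix_takeWhile p.toList hnl cs]
    exact hx
  · rintro ⟨p, hp, hx⟩
    refine ⟨p, hp, ?_⟩
    have hnl : '\n' ∉ p.toList := by fin_cases hp <;> decide
    simp only [PySem.Chars.startswith] at hx ⊢
    rw [prefix_takeWhile p.toList hnl cs]
    exact hx

-- main: A's recursion equals B's scan over splitNl
theorem core_eq_scan (cs : List Char) : extract_cypher_core cs = alt_scan (splitNl cs) := by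
  induction hn : cs.length using Nat.strong_induction_on generalizing cs with
  | _ n ih =>
    subst hn
    by_cases hm : (cypher_prefix.any fun p => PySem.Chars.startswith cs p.toList) = true
    · rw [extract_cypher_core, if_pos hm, splitNl_step]
      have hm' : (cypher_prefix.any fun p => PySem.Chars.startswith (cs.takeWhile (· ≠ '\n')) p.toList) = true := by
        rw [← match_takeWhile]; exact hm
      rw [alt_scan, if_pos hm', ← splitNl_step, join_splitNl]
    · have hm' : ¬ (cypher_prefix.any fun p => PySem.Chars.startswith (cs.takeWhile (· ≠ '\n')) p.toList) = true := by
        rw [← match_takeWhile]; exact hm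
      by_cases hnl : '\n' ∈ cs
      · rw [extract_cypher_core, if_neg hm]
        simp only [splitOnMax1_eq, if_pos hnl, List.length_cons, List.length_nil]
        norm_num
        rw [splitNl_step, if_pos hnl, alt_scan, if_neg hm']
        simpa using ih _ (tail_drop_lt cs hnl) _ rfl
      · rw [extract_cypher_core, if_neg hm]
        simp only [splitOnMax1_eq, if_neg hnl, List.length_cons, List.length_nil]
        simp only [if_true]
        rw [splitNl_step, if_neg hnl, alt_scan, if_neg hm', alt_scan]

-- ===== VERDICT (by name: the statement is the Claim_ definition above) =====
theorem extract_cypher_spec : Claim_equal_extract_cypher := by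
  intro s _
  unfold Spec_extract_cypher extract_cypher extract_cypher_alt
  rw [splitOn_eq, core_eq_scan]
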